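-- pv_equiv track=rewrite | github.com/KhalilIbrahimm/Algorithms-Engineering-INF237 | segment_trees/turbo.py | solve_turbo_sort
-- ===== SOURCE A (Python) =====
-- def build_segment_tree(n):
--     size = 2 * n
--     tree = [0] * size
--     for i in range(n):
--         tree[n + i] = 1
--     for i in range(n - 1, 0, -1):
--         tree[i] = tree[2 * i] + tree[2 * i + 1]
--     return tree
--
-- def query(tree, n, l, r):
--     l += n
--     r += n
--     res = 0
--     while l < r:
--         if l % 2:
--             res += tree[l]
--             l += 1
--         if r % 2:
--             r -= 1
--             res += tree[r]
--         l //= 2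
--         r //= 2
--     return res
--
-- def update(tree, n, pos, val):
--     pos += n
--     tree[pos] = val
--     while pos > 1:
--         pos //= 2
--         tree[pos] = tree[2 * pos] + tree[2 * pos + 1]
--
-- def solve_turbo_sort(n, arr):
--     tree = build_segment_tree(n)
--     pos = [0] * (n + 1)
--     for i, val in enumerate(arr):
--         pos[val] = i
--
--     low, high = 1, n
--     output = []
--     for i in range(n):
--         if i % 2 == 0:
--             x = low
--             low += 1
--             swaps = query(tree, n, 0, pos[x])
--         else:
--             x = high
--             high -= 1
--             swaps = query(tree, n, pos[x] + 1, n)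
--         output.append(str(swaps))
--         update(tree, n, pos[x], 0)
--     return output
-- ===== SOURCE B (Python) =====
-- def solve_turbo_sort(n, arr):
--     pos = [0] * (n + 1)
--     for i, val in enumerate(arr):
--         pos[val] = i
--     bs = 1
--     while bs * bs < n:
--         bs += 1
--     nb = n // bs + 1
--     alive = [1] * n
--     blk = [0] * nb
--     for b in range(nb):
--         lo = b * bs
--         blk[b] = sum(alive[lo:lo + bs])
--
--     def prefix(p):
--         q = p // bs
--         return sum(blk[:q]) + sum(alive[q * bs:p])
--
--     low, high = 1, n
--     out = []
--     for r in range(n):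
--         if r % 2 == 0:
--             x = low
--             low += 1
--             swaps = prefix(pos[x])
--         else:
--             x = high
--             high -= 1
--             swaps = prefix(n) - prefix(pos[x] + 1)
--         out.append(str(swaps))
--         p = pos[x]
--         alive[p] = 0
--         q = p // bs
--         blk[q] = sum(alive[q * bs:q * bs + bs])
--     return out
-- ===== Notes on version B (the rewrite author's own statement) =====
-- stated objective: alternative
-- what changed: Replaces the iterative bottom-up segment tree (array of 2n nodes with parent/child index arithmetic for build, query and update) by a flat sqrt-decomposition: an alive 0/1 array plus per-block counts, prefix counts computed as a block-prefix sum plus an in-block tail sum, and a deletion as one point write plus recomputing the affected block count.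
-- outside the precondition, e.g. on solve_turbo_sort(2, [1, 2, 0, 0, 0]): A returns ['0', '0'], B returns ['0', '0']
import Mathlib
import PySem

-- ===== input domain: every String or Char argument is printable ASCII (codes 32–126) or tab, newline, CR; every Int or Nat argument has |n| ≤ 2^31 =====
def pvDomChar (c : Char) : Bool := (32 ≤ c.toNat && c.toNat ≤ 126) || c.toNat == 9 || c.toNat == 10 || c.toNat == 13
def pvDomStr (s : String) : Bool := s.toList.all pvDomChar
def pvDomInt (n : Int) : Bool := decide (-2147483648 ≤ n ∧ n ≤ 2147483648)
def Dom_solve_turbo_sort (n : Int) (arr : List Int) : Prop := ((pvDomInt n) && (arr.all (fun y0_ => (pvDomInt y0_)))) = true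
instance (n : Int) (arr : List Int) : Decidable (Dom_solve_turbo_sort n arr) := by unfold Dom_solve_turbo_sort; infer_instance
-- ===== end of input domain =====

-- B replaces A's iterative segment tree by a flat sqrt-decomposition (alive array + block counts);
-- equivalence is proved on Pre_: the inputs (0 <= n, len(arr) <= n, values in [-(n+1), n], or
-- n < 0 with arr = []) on which A completes without an exception.

-- list read t[i] / write t[i] = v; exact for 0 ≤ i < len, which Pre_ guarantees at every use
def pvGet (t : List Int) (i : Int) : Int := PySem.List.pyGetD t i 0
def pvSet (t : List Int) (i : Int) (v : Int) : List Int := PySem.List.pySetD t i v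

-- ===== PORT A =====
def build_segment_tree (n : Int) : List Int :=
  let tree := List.replicate (2 * n).toNat 0
  let tree := (PySem.List.pyRange 0 n 1).foldl (fun t i => pvSet t (n + i) 1) tree
  (PySem.List.pyRange (n - 1) 0 (-1)).foldl
    (fun t i => pvSet t i (pvGet t (2 * i) + pvGet t (2 * i + 1))) tree

-- while l < r of 'query'; the 0 ≤ l conjunct only makes the recursion total (always true at call sites)
def queryGo (t : List Int) (l r res : Int) : Int :=
  if _h : 0 ≤ l ∧ l < r then
    let res1 := if PySem.Int.mod l 2 ≠ 0 then res + pvGet t l else res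
    let l1 := if PySem.Int.mod l 2 ≠ 0 then l + 1 else l
    let res2 := if PySem.Int.mod r 2 ≠ 0 then res1 + pvGet t (r - 1) else res1
    let r1 := if PySem.Int.mod r 2 ≠ 0 then r - 1 else r
    queryGo t (PySem.Int.floordiv l1 2) (PySem.Int.floordiv r1 2) res2
  else res
termination_by r.toNat
decreasing_by
  rw [PySem.Int.floordiv_eq_ediv_of_pos (by omega)]
  split_ifs <;> omega

def query (t : List Int) (n l r : Int) : Int := queryGo t (l + n) (r + n) 0

-- while pos > 1 of 'update'
def updateGo (t : List Int) (p : Int) : List Int :=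
  if h : 1 < p then
    let p1 := PySem.Int.floordiv p 2
    updateGo (pvSet t p1 (pvGet t (2 * p1) + pvGet t (2 * p1 + 1))) p1
  else t
termination_by p.toNat
decreasing_by
  rw [PySem.Int.floordiv_eq_ediv_of_pos (by omega)]
  omega

def update (t : List Int) (n pos val : Int) : List Int :=
  updateGo (pvSet t (pos + n) val) (pos + n)

def solve_turbo_sort (n : Int) (arr : List Int) : List String :=
  let tree := build_segment_tree n
  let pos := (PySem.List.enumerate arr).foldl (fun p iv => pvSet p iv.2 iv.1)
      (List.replicate (n + 1).toNat 0)
  let fin := (PySem.List.pyRange 0 n 1).foldl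
    (fun (st : List Int × Int × Int × List String) i =>
      let tree := st.1; let low := st.2.1; let high := st.2.2.1; let output := st.2.2.2
      if PySem.Int.mod i 2 = 0 then
        let x := low
        let swaps := query tree n 0 (pvGet pos x)
        (update tree n (pvGet pos x) 0, low + 1, high, output ++ [PySem.Int.toStr swaps])
      else
        let x := high
        let swaps := query tree n (pvGet pos x + 1) n
        (update tree n (pvGet pos x) 0, low, high - 1, output ++ [PySem.Int.toStr swaps]))
    (tree, 1, n, [])
  fin.2.2.2

-- ===== PORT B =====
-- while bs * bs < n: bs += 1
def bsLoop (n bs : Int) : Int :=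
  if h : bs * bs < n then bsLoop n (bs + 1) else bs
termination_by (n - bs).toNat
decreasing_by
  have h1 : bs ≤ bs * bs := by
    by_cases hb : 1 ≤ bs
    · nlinarith
    · nlinarith
  omega

def pvPrefix (blk alive : List Int) (bs p : Int) : Int :=
  let q := PySem.Int.floordiv p bs
  (PySem.List.slice blk none (some q)).sum
    + (PySem.List.slice alive (some (q * bs)) (some p)).sum

def solve_turbo_sort_alt (n : Int) (arr : List Int) : List String :=
  let pos := (PySem.List.enumerate arr).foldl (fun p iv => pvSet p iv.2 iv.1)
      (List.replicate (n + 1).toNat 0)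
  let bs := bsLoop n 1
  let nb := PySem.Int.floordiv n bs + 1
  let alive := List.replicate n.toNat (1 : Int)
  let blk := (PySem.List.pyRange 0 nb 1).foldl
      (fun bl b => pvSet bl b (PySem.List.slice alive (some (b * bs)) (some (b * bs + bs))).sum)
      (List.replicate nb.toNat 0)
  let fin := (PySem.List.pyRange 0 n 1).foldl
    (fun (st : List Int × List Int × Int × Int × List String) r =>
      let alive := st.1; let blk := st.2.1; let low := st.2.2.1
      let high := st.2.2.2.1; let out := st.2.2.2.2
      let xswaps :=
        if PySem.Int.mod r 2 = 0 then
          (low, pvPrefix blk alive bs (pvGet pos low), low + 1, high)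
        else
          (high, pvPrefix blk alive bs n - pvPrefix blk alive bs (pvGet pos high + 1), low, high - 1)
      let x := xswaps.1; let swaps := xswaps.2.1
      let p := pvGet pos x
      let alive2 := pvSet alive p 0
      let q := PySem.Int.floordiv p bs
      (alive2,
       pvSet blk q (PySem.List.slice alive2 (some (q * bs)) (some (q * bs + bs))).sum,
       xswaps.2.2.1, xswaps.2.2.2, out ++ [PySem.Int.toStr swaps]))
    (alive, blk, 1, n, [])
  fin.2.2.2.2

-- ===== PRECONDITION & SPEC =====
-- Pre_ admits exactly the inputs on which A completes without an exception: every pos write is in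
-- range (values within [-(n+1), n]) and every deleted index is a valid leaf (len(arr) <= n; for
-- n < 0 only the empty list avoids the pos[val] IndexError).  A may also happen to return on some
-- len(arr) > n inputs whose stale duplicate entries never reach an out-of-range tree write; those
-- are excluded (B agrees with A there as well, see the cite).
def Pre_solve_turbo_sort (n : Int) (arr : List Int) : Prop :=
  (0 ≤ n ∧ (arr.length : Int) ≤ n ∧ ∀ x ∈ arr, -(n+1) ≤ x ∧ x ≤ n) ∨ (n < 0 ∧ arr = [])
instance (n : Int) (arr : List Int) : Decidable (Pre_solve_turbo_sort n arr) := by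
  unfold Pre_solve_turbo_sort; infer_instance

def pvWitness_solve_turbo_sort : Int × List Int := (3, [2, 3, 1])

def Spec_solve_turbo_sort (n : Int) (arr : List Int) (out : List String) : Prop := out = solve_turbo_sort_alt n arr
instance (n : Int) (arr : List Int) (out : List String) : Decidable (Spec_solve_turbo_sort n arr out) := by unfold Spec_solve_turbo_sort; infer_instance

-- ===== CLAIM (what is proved, stated in full; the proofs are below) =====
def Claim_equal_solve_turbo_sort : Prop := ∀ (n : Int) (arr : List Int), Dom_solve_turbo_sort n arr → Pre_solve_turbo_sort n arr → Spec_solve_turbo_sort n arr (solve_turbo_sort n arr)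


-- ===== LEMMAS AND PROOFS =====

-- index bridges -----------------------------------------------------------

theorem pvGet_natCast (t : List Int) (j : ℕ) : pvGet t (j : Int) = t.getD j 0 := by
  simp [pvGet, List.getD]

theorem pvSet_natCast (t : List Int) (j : ℕ) (v : Int) : pvSet t (j : Int) v = t.set j v := by
  simp [pvSet]

theorem getD_set_self (t : List Int) (m : ℕ) (v : Int) (h : m < t.length) :
    (t.set m v).getD m 0 = v := by
  simp [List.getD, List.getElem?_set_self, h]

theorem getD_set_ne (t : List Int) (m j : ℕ) (v : Int) (h : j ≠ m) :
    (t.set m v).getD j 0 = t.getD j 0 := by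
  simp [List.getD, List.getElem?_set_ne (Ne.symm h)]

theorem getD_replicate (N j : ℕ) (v : Int) : (List.replicate N v).getD j 0 = if j < N then v else 0 := by
  split_ifs with h
  · simp [List.getD, List.getElem?_replicate, h]
  · simp [List.getD, List.getElem?_replicate, h]

-- the segment-tree node value ---------------------------------------------

def pvSub (N : ℕ) (g : ℕ → Int) (j : ℕ) : Int :=
  if _h1 : j = 0 then 0
  else if _h2 : N ≤ j then g (j - N)
  else pvSub N g (2*j) + pvSub N g (2*j+1)
termination_by 2*N - j
decreasing_by all_goals omega

theorem pvSub_leaf (N : ℕ) (g : ℕ → Int) (j : ℕ) (h0 : 1 ≤ j) (h : N ≤ j) :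
    pvSub N g j = g (j - N) := by
  have g1 : ¬ j = 0 := by omega
  rw [pvSub, dif_neg g1, dif_pos h]

theorem pvSub_node (N : ℕ) (g : ℕ → Int) (j : ℕ) (h0 : 1 ≤ j) (h : j < N) :
    pvSub N g j = pvSub N g (2*j) + pvSub N g (2*j+1) := by
  have g1 : ¬ j = 0 := by omega
  have g2 : ¬ N ≤ j := by omega
  rw [pvSub, dif_neg g1, dif_neg g2]

theorem pvSub_zero (N : ℕ) (g : ℕ → Int) : pvSub N g 0 = 0 := by
  rw [pvSub]; simp

-- off-path: updating leaf p does not change a node that is not an ancestor of leaf N+p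
theorem pvSub_offpath (N p : ℕ) (hp : p < N) (g : ℕ → Int) (v : Int) :
    ∀ d j, 2*N - j ≤ d → (∀ k, j ≠ (N + p) / 2^k) →
      pvSub N (fun x => if x = p then v else g x) j = pvSub N g j := by
  intro d
  induction d with
  | zero =>
    intro j h1 hj
    by_cases hj0 : j = 0
    · subst hj0; rw [pvSub_zero, pvSub_zero]
    · have h2 : N ≤ j := by omega
      rw [pvSub_leaf N (fun x => if x = p then v else g x) j (by omega) h2,
          pvSub_leaf N g j (by omega) h2]
      have h0 := hj 0
      simp only [pow_zero, Nat.div_one] at h0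
      have hne : j - N ≠ p := by omega
      simp [hne]
  | succ d ih =>
    intro j h1 hj
    by_cases hj0 : j = 0
    · subst hj0; rw [pvSub_zero, pvSub_zero]
    · by_cases hleaf : N ≤ j
      · rw [pvSub_leaf N (fun x => if x = p then v else g x) j (by omega) hleaf,
            pvSub_leaf N g j (by omega) hleaf]
        have h0 := hj 0
        simp only [pow_zero, Nat.div_one] at h0
        have hne : j - N ≠ p := by omega
        simp [hne]
      · have hanc : ∀ c : ℕ, c / 2 = j → ∀ k, c ≠ (N + p) / 2^k := by
          intro c hc k
          intro hck
          have := hj (k+1)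
          rw [pow_succ, ← Nat.div_div_eq_div_mul] at this
          omega
        rw [pvSub_node N (fun x => if x = p then v else g x) j (by omega) (by omega),
            pvSub_node N g j (by omega) (by omega),
            ih (2*j) (by omega) (hanc (2*j) (by omega)),
            ih (2*j+1) (by omega) (hanc (2*j+1) (by omega))]

-- tree representation invariant -------------------------------------------

def pvRep (t : List Int) (N : ℕ) (g : ℕ → Int) : Prop :=
  t.length = 2*N ∧ ∀ j, 1 ≤ j → j < 2*N → t.getD j 0 = pvSub N g j

-- build -------------------------------------------------------------------

theorem foldl_set_range (F : ℕ → Int) (off : ℕ) (m : ℕ) (init : List Int)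
    (hm : off + m ≤ init.length) :
    (((List.range m).foldl (fun t b => t.set (off + b) (F b)) init).length = init.length) ∧
    ∀ j, ((List.range m).foldl (fun t b => t.set (off + b) (F b)) init).getD j 0
        = if off ≤ j ∧ j < off + m then F (j - off) else init.getD j 0 := by
  induction m with
  | zero => exact ⟨rfl, fun j => by rw [if_neg (by omega)]; simp⟩
  | succ m ih =>
    have ih' := ih (by omega)
    rw [List.range_succ, List.foldl_append]
    simp only [List.foldl_cons, List.foldl_nil]
    constructor
    · rw [List.length_set, ih'.1]
    · intro j
      by_cases hj : j = off + m
      · subst hj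
        rw [getD_set_self _ _ _ (by rw [ih'.1]; omega)]
        simp [Nat.add_sub_cancel_left]
      · rw [getD_set_ne _ _ _ _ hj, ih'.2 j]
        by_cases h1 : off ≤ j ∧ j < off + m
        · rw [if_pos h1, if_pos ⟨h1.1, by omega⟩]
        · rw [if_neg h1, if_neg (by omega)]

theorem build_phase2 (N : ℕ) (g : ℕ → Int) :
    ∀ (k : ℕ), k < N → ∀ t : List Int, t.length = 2*N →
      (∀ j, k < j → j < 2*N → t.getD j 0 = pvSub N g j) →
      ((PySem.List.pyRange (k : Int) 0 (-1)).foldl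
          (fun t i => pvSet t i (pvGet t (2*i) + pvGet t (2*i+1))) t).length = 2*N ∧
      ∀ j, 1 ≤ j → j < 2*N →
        ((PySem.List.pyRange (k : Int) 0 (-1)).foldl
          (fun t i => pvSet t i (pvGet t (2*i) + pvGet t (2*i+1))) t).getD j 0 = pvSub N g j := by
  intro k
  induction k with
  | zero =>
    intro _ t hlen hinv
    rw [PySem.List.pyRange_neg_one_eq_nil (by norm_num)]
    exact ⟨hlen, fun j h1 h2 => hinv j (by omega) h2⟩
  | succ k ih =>
    intro hk t hlen hinv
    rw [PySem.List.pyRange_neg_one_cons (by exact_mod_cast Nat.succ_pos k)]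
    simp only [List.foldl_cons]
    have hsub : ((k:Int) + 1 - 1) = (k : Int) := by ring
    have hcast : ((k+1 : ℕ) : Int) = (k : Int) + 1 := by push_cast; ring
    rw [hcast, hsub]
    have hc1 : (2 : Int) * ((k:Int)+1) = ((2*(k+1) : ℕ) : Int) := by push_cast; ring
    have hc2 : (2 : Int) * ((k:Int)+1) + 1 = ((2*(k+1)+1 : ℕ) : Int) := by push_cast; ring
    have hget1 : pvGet t (2*((k:Int)+1)) = pvSub N g (2*(k+1)) := by
      rw [hc1, pvGet_natCast]; exact hinv _ (by omega) (by omega)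
    have hget2 : pvGet t (2*((k:Int)+1) + 1) = pvSub N g (2*(k+1)+1) := by
      rw [hc2, pvGet_natCast]; exact hinv _ (by omega) (by omega)
    have hsetc : pvSet t ((k:Int)+1) (pvSub N g (2*(k+1)) + pvSub N g (2*(k+1)+1))
        = t.set (k+1) (pvSub N g (k+1)) := by
      rw [show ((k:Int)+1) = ((k+1 : ℕ) : Int) by push_cast; ring, pvSet_natCast,
          ← pvSub_node N g (k+1) (by omega) (by omega)]
    rw [hget1, hget2, hsetc]
    exact ih (by omega) _ (by rw [List.length_set]; exact hlen)
      (fun j hj1 hj2 => by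
        by_cases hje : j = k+1
        · subst hje; rw [getD_set_self _ _ _ (by omega)]
        · rw [getD_set_ne _ _ _ _ hje]; exact hinv j (by omega) hj2)

theorem build_correct (N : ℕ) : pvRep (build_segment_tree (N : Int)) N (fun _ => 1) := by
  have h2N : (2*(N:Int)).toNat = 2*N := by
    rw [show (2*(N:Int)) = ((2*N : ℕ) : Int) by push_cast; ring, Int.toNat_natCast]
  simp only [build_segment_tree]
  rw [h2N]
  -- phase 1: leaves
  rw [PySem.List.pyRange_zero_nat, List.foldl_map]
  have hf : (fun (t : List Int) (k : ℕ) => pvSet t ((N:Int) + (k:Int)) 1)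
      = fun (t : List Int) (b : ℕ) => t.set (N + b) ((fun _ : ℕ => (1:Int)) b) := by
    funext t k
    rw [show ((N:Int) + (k:Int)) = ((N + k : ℕ) : Int) by push_cast; ring, pvSet_natCast]
  rw [hf]
  have h1 := foldl_set_range (fun _ => (1:Int)) N N (List.replicate (2*N) 0)
      (by simp [List.length_replicate]; omega)
  set t1 := (List.range N).foldl (fun (t : List Int) (b : ℕ) => t.set (N + b) 1)
      (List.replicate (2*N) (0:Int)) with ht1
  have hlen1 : t1.length = 2*N := by rw [h1.1]; simp
  have hinv1 : ∀ j, N ≤ j → j < 2*N → t1.getD j 0 = pvSub N (fun _ => 1) j := by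
    intro j hj1 hj2
    rw [h1.2 j, if_pos ⟨hj1, by omega⟩, pvSub_leaf N _ j (by omega) hj1]
  -- phase 2: internal nodes
  by_cases hN : N = 0
  · subst hN
    rw [PySem.List.pyRange_neg_one_eq_nil (by norm_num)]
    exact ⟨hlen1, fun j h1 h2 => by omega⟩
  · have hNcast : ((N:Int) - 1) = ((N - 1 : ℕ) : Int) := by push_cast [Nat.cast_sub (by omega : 1 ≤ N)]; ring
    rw [hNcast]
    have := build_phase2 N (fun _ => 1) (N-1) (by omega) t1 hlen1
      (fun j hj1 hj2 => hinv1 j (by omega) hj2)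
    exact ⟨this.1, this.2⟩

-- query -------------------------------------------------------------------

theorem sum_Ico_double (a b : ℕ) (h : a ≤ b) (f : ℕ → Int) :
    ∑ j ∈ Finset.Ico (2*a) (2*b), f j = ∑ q ∈ Finset.Ico a b, (f (2*q) + f (2*q+1)) := by
  induction b, h using Nat.le_induction with
  | base => simp
  | succ b hb ih =>
    have h1 : 2*(b+1) = (2*b+1)+1 := by omega
    rw [h1, Finset.sum_Ico_succ_top (by omega), Finset.sum_Ico_succ_top (by omega),
        Finset.sum_Ico_succ_top (by omega), ih]
    ring

theorem sum_Ico_single (f : ℕ → Int) (a : ℕ) : ∑ j ∈ Finset.Ico a (a+1), f j = f a := by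
  rw [Finset.sum_Ico_succ_top (le_refl a), Finset.Ico_self, Finset.sum_empty, zero_add]

theorem queryGo_correct (t : List Int) (N : ℕ) (g : ℕ → Int)
    (hrep : ∀ j, 1 ≤ j → j < 2*N → t.getD j 0 = pvSub N g j) :
    ∀ rn ln (res : Int), 1 ≤ ln → ln ≤ rn → rn ≤ 2*N →
      queryGo t (ln : Int) (rn : Int) res = res + ∑ j ∈ Finset.Ico ln rn, pvSub N g j := by
  intro rn
  induction rn using Nat.strong_induction_on with
  | _ rn ih =>
    intro ln res h1 h2 h3
    by_cases hlt : ln < rn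
    · have hT : ∀ (j : ℕ), 1 ≤ j → j < 2*N → pvGet t (j:Int) = pvSub N g j :=
        fun j a b => by rw [pvGet_natCast]; exact hrep j a b
      rw [queryGo, dif_pos ⟨by exact_mod_cast Nat.zero_le ln, by exact_mod_cast hlt⟩]
      simp only [PySem.Int.mod_eq_emod_of_pos (by norm_num : (0:Int) < 2),
                 PySem.Int.floordiv_eq_ediv_of_pos (by norm_num : (0:Int) < 2)]
      have hsd := sum_Ico_double
      by_cases hl : ln % 2 = 0 <;> by_cases hr : rn % 2 = 0
      · -- both even
        simp only [if_neg (by omega : ¬ ((ln:Int) % 2 ≠ 0)),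
                   if_neg (by omega : ¬ ((rn:Int) % 2 ≠ 0))]
        rw [show ((ln:Int))/2 = ((ln/2:ℕ):Int) by omega,
            show ((rn:Int))/2 = ((rn/2:ℕ):Int) by omega,
            ih (rn/2) (by omega) (ln/2) res (by omega) (by omega) (by omega)]
        have hd := sum_Ico_double (ln/2) (rn/2) (by omega) (pvSub N g)
        rw [show 2*(ln/2) = ln by omega, show 2*(rn/2) = rn by omega] at hd
        have hc : ∑ q ∈ Finset.Ico (ln/2) (rn/2), (pvSub N g (2*q) + pvSub N g (2*q+1))
            = ∑ q ∈ Finset.Ico (ln/2) (rn/2), pvSub N g q :=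
          Finset.sum_congr rfl (fun q hq => by
            rw [Finset.mem_Ico] at hq
            exact (pvSub_node N g q (by omega) (by omega)).symm)
        rw [hd, hc]
      · -- ln even, rn odd
        simp only [if_neg (by omega : ¬ ((ln:Int) % 2 ≠ 0)),
                   if_pos (by omega : ((rn:Int) % 2 ≠ 0))]
        rw [show ((rn:Int) - 1) = ((rn-1:ℕ):Int) by omega, hT (rn-1) (by omega) (by omega),
            show ((ln:Int))/2 = ((ln/2:ℕ):Int) by omega,
            show (((rn-1:ℕ):Int))/2 = (((rn-1)/2:ℕ):Int) by omega,
            ih ((rn-1)/2) (by omega) (ln/2) _ (by omega) (by omega) (by omega)]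
        have hd := sum_Ico_double (ln/2) ((rn-1)/2) (by omega) (pvSub N g)
        rw [show 2*(ln/2) = ln by omega, show 2*((rn-1)/2) = rn-1 by omega] at hd
        have hc : ∑ q ∈ Finset.Ico (ln/2) ((rn-1)/2), (pvSub N g (2*q) + pvSub N g (2*q+1))
            = ∑ q ∈ Finset.Ico (ln/2) ((rn-1)/2), pvSub N g q :=
          Finset.sum_congr rfl (fun q hq => by
            rw [Finset.mem_Ico] at hq
            exact (pvSub_node N g q (by omega) (by omega)).symm)
        rw [← hc, ← hd]
        have hsing : ∑ j ∈ Finset.Ico (rn-1) rn, pvSub N g j = pvSub N g (rn-1) := by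
          rw [show rn = (rn-1)+1 by omega]
          simp only [Nat.add_sub_cancel]
          exact sum_Ico_single _ _
        rw [← Finset.sum_Ico_consecutive (pvSub N g) (show ln ≤ rn-1 by omega)
              (show rn-1 ≤ rn by omega), hsing]
        ring
      · -- ln odd, rn even
        simp only [if_pos (by omega : ((ln:Int) % 2 ≠ 0)),
                   if_neg (by omega : ¬ ((rn:Int) % 2 ≠ 0))]
        rw [hT ln (by omega) (by omega),
            show ((ln:Int) + 1) = ((ln+1:ℕ):Int) by push_cast; ring,
            show (((ln+1:ℕ):Int))/2 = (((ln+1)/2:ℕ):Int) by omega,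
            show ((rn:Int))/2 = ((rn/2:ℕ):Int) by omega,
            ih (rn/2) (by omega) ((ln+1)/2) _ (by omega) (by omega) (by omega)]
        have hd := sum_Ico_double ((ln+1)/2) (rn/2) (by omega) (pvSub N g)
        rw [show 2*((ln+1)/2) = ln+1 by omega, show 2*(rn/2) = rn by omega] at hd
        have hc : ∑ q ∈ Finset.Ico ((ln+1)/2) (rn/2), (pvSub N g (2*q) + pvSub N g (2*q+1))
            = ∑ q ∈ Finset.Ico ((ln+1)/2) (rn/2), pvSub N g q :=
          Finset.sum_congr rfl (fun q hq => by
            rw [Finset.mem_Ico] at hq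
            exact (pvSub_node N g q (by omega) (by omega)).symm)
        rw [← hc, ← hd, Finset.sum_eq_sum_Ico_succ_bot hlt]
        ring
      · -- both odd
        simp only [if_pos (by omega : ((ln:Int) % 2 ≠ 0)),
                   if_pos (by omega : ((rn:Int) % 2 ≠ 0))]
        rw [hT ln (by omega) (by omega),
            show ((rn:Int) - 1) = ((rn-1:ℕ):Int) by omega, hT (rn-1) (by omega) (by omega),
            show ((ln:Int) + 1) = ((ln+1:ℕ):Int) by push_cast; ring,
            show (((ln+1:ℕ):Int))/2 = (((ln+1)/2:ℕ):Int) by omega,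
            show (((rn-1:ℕ):Int))/2 = (((rn-1)/2:ℕ):Int) by omega,
            ih ((rn-1)/2) (by omega) ((ln+1)/2) _ (by omega) (by omega) (by omega)]
        have hd := sum_Ico_double ((ln+1)/2) ((rn-1)/2) (by omega) (pvSub N g)
        rw [show 2*((ln+1)/2) = ln+1 by omega, show 2*((rn-1)/2) = rn-1 by omega] at hd
        have hc : ∑ q ∈ Finset.Ico ((ln+1)/2) ((rn-1)/2), (pvSub N g (2*q) + pvSub N g (2*q+1))
            = ∑ q ∈ Finset.Ico ((ln+1)/2) ((rn-1)/2), pvSub N g q :=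
          Finset.sum_congr rfl (fun q hq => by
            rw [Finset.mem_Ico] at hq
            exact (pvSub_node N g q (by omega) (by omega)).symm)
        rw [← hc, ← hd, Finset.sum_eq_sum_Ico_succ_bot hlt]
        have hsing : ∑ j ∈ Finset.Ico (rn-1) rn, pvSub N g j = pvSub N g (rn-1) := by
          rw [show rn = (rn-1)+1 by omega]
          simp only [Nat.add_sub_cancel]
          exact sum_Ico_single _ _
        rw [← Finset.sum_Ico_consecutive (pvSub N g) (show ln+1 ≤ rn-1 by omega)
              (show rn-1 ≤ rn by omega), hsing]
        ring
    · have heq : ln = rn := by omega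
      subst heq
      rw [queryGo, dif_neg (by omega), Finset.Ico_self, Finset.sum_empty, add_zero]

theorem query_correct (t : List Int) (N : ℕ) (g : ℕ → Int) (hrep : pvRep t N g)
    (a b : ℕ) (hab : a ≤ b) (hb : b ≤ N) (hN : 1 ≤ N) :
    query t (N : Int) (a : Int) (b : Int) = ∑ j ∈ Finset.Ico a b, g j := by
  unfold query
  rw [show ((a:Int) + (N:Int)) = ((a + N : ℕ) : Int) by push_cast; ring,
      show ((b:Int) + (N:Int)) = ((b + N : ℕ) : Int) by push_cast; ring,
      queryGo_correct t N g hrep.2 (b+N) (a+N) 0 (by omega) (by omega) (by omega),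
      zero_add, Finset.sum_Ico_eq_sum_range, Finset.sum_Ico_eq_sum_range,
      show (b + N) - (a + N) = b - a by omega]
  apply Finset.sum_congr rfl
  intro i hi
  rw [Finset.mem_range] at hi
  rw [pvSub_leaf N g (a+N+i) (by omega) (by omega)]
  congr 1
  omega

-- update ------------------------------------------------------------------

theorem updateGo_inv (N : ℕ) (g' : ℕ → Int) :
    ∀ m, 1 ≤ m → m < 2*N → ∀ t : List Int, t.length = 2*N →
      (∀ j, 1 ≤ j → j < 2*N → (∀ k, 1 ≤ k → j ≠ m / 2^k) → t.getD j 0 = pvSub N g' j) →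
      pvRep (updateGo t (m : Int)) N g' := by
  intro m
  induction m using Nat.strong_induction_on with
  | _ m ih =>
    intro hm1 hm2 t hlen hinv
    by_cases hm : 1 < m
    · rw [updateGo, dif_pos (by exact_mod_cast hm)]
      rw [PySem.Int.floordiv_eq_ediv_of_pos (by norm_num : (0:Int) < 2),
          show ((m:Int))/2 = ((m/2:ℕ):Int) by omega]
      dsimp only
      have hgets : ∀ c : ℕ, 2*(m/2) ≤ c → c ≤ 2*(m/2)+1 → pvGet t ((c:ℕ):Int) = pvSub N g' c := by
        intro c hc1 hc2
        rw [pvGet_natCast]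
        apply hinv c (by omega) (by omega)
        intro k hk hck
        have : m / 2^k ≤ m/2 := by
          calc m / 2^k ≤ m / 2^1 := Nat.div_le_div_left (Nat.pow_le_pow_right (by omega) hk) (by positivity)
          _ = m / 2 := by norm_num
        omega
      rw [show (2 : Int) * ((m/2:ℕ):Int) = ((2*(m/2) : ℕ):Int) by push_cast; ring]
      rw [show (((2*(m/2) : ℕ)):Int) + 1 = ((2*(m/2)+1 : ℕ):Int) by push_cast; ring]
      rw [hgets (2*(m/2)) (le_refl _) (by omega), hgets (2*(m/2)+1) (by omega) (le_refl _),
          pvSet_natCast, ← pvSub_node N g' (m/2) (by omega) (by omega)]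
      apply ih (m/2) (by omega) (by omega) (by omega)
      · rw [List.length_set]; exact hlen
      · intro j hj1 hj2 hj3
        by_cases hje : j = m/2
        · subst hje; rw [getD_set_self _ _ _ (by omega)]
        · rw [getD_set_ne _ _ _ _ hje]
          apply hinv j hj1 hj2
          intro k hk
          rcases Nat.eq_or_lt_of_le hk with hk1 | hk1
          · rw [← hk1]; simpa using hje
          · have := hj3 (k-1) (by omega)
            rw [show m / 2^k = m / 2 / 2^(k-1) by
                  rw [Nat.div_div_eq_div_mul, ← pow_succ', show k-1+1 = k by omega]]
            exact this
    · have hm1' : m = 1 := by omega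
      subst hm1'
      rw [updateGo, dif_neg (by omega)]
      refine ⟨hlen, fun j hj1 hj2 => hinv j hj1 hj2 (fun k hk => ?_)⟩
      have : 1 / 2^k = 0 := Nat.div_eq_of_lt (Nat.one_lt_two_pow_iff.mpr (by omega))
      omega

theorem update_correct (t : List Int) (N : ℕ) (g : ℕ → Int) (hrep : pvRep t N g)
    (p : ℕ) (hp : p < N) (v : Int) :
    pvRep (update t (N : Int) (p : Int) v) N (fun j => if j = p then v else g j) := by
  unfold update
  have hlen := hrep.1
  rw [show ((p:Int) + (N:Int)) = ((p + N : ℕ):Int) by push_cast; ring, pvSet_natCast]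
  apply updateGo_inv N _ (p+N) (by omega) (by omega)
  · rw [List.length_set]; exact hrep.1
  · intro j hj1 hj2 hj3
    by_cases hje : j = p + N
    · subst hje
      rw [getD_set_self _ _ _ (by omega)]
      rw [pvSub_leaf N _ (p+N) (by omega) (by omega)]
      simp
    · rw [getD_set_ne _ _ _ _ hje, hrep.2 j hj1 hj2]
      symm
      apply pvSub_offpath N p hp g v (2*N) j (by omega)
      intro k
      cases k with
      | zero =>
        simp only [pow_zero, Nat.div_one]
        omega
      | succ k =>
        have := hj3 (k+1) (by omega)
        rwa [Nat.add_comm p N] at this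

-- B-side: sqrt decomposition ----------------------------------------------

theorem bsLoop_ge (n : Int) : ∀ b : Int, b ≤ bsLoop n b := by
  intro b
  fun_induction bsLoop n b with
  | case1 b h ih => omega
  | case2 b h => omega

theorem sum_drop_take (l : List Int) :
    ∀ (k a : ℕ), ((l.drop a).take k).sum = ∑ j ∈ Finset.Ico a (min (a + k) l.length), l.getD j 0 := by
  intro k
  induction k with
  | zero =>
    intro a
    rw [List.take_zero, Finset.Ico_eq_empty (by omega)]
    simp
  | succ k ih =>
    intro a
    by_cases ha : a < l.length
    · rw [List.drop_eq_getElem_cons ha]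
      simp only [List.take_succ_cons, List.sum_cons]
      rw [ih (a+1)]
      have hlt : a < min (a + (k+1)) l.length := by omega
      rw [Finset.sum_eq_sum_Ico_succ_bot hlt]
      have : min (a + 1 + k) l.length = min (a + (k+1)) l.length := by omega
      rw [this]
      simp [List.getD, List.getElem?_eq_getElem ha]
    · rw [List.drop_of_length_le (by omega), List.take_nil, Finset.Ico_eq_empty (by omega)]
      simp

def pvNB (N bsN : ℕ) : ℕ := N / bsN + 1

def pvBRep (alive blk : List Int) (bsN N : ℕ) (g : ℕ → Int) : Prop :=
  1 ≤ bsN ∧ alive.length = N ∧ blk.length = pvNB N bsN ∧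
  (∀ j, j < N → alive.getD j 0 = g j) ∧
  (∀ b, b < pvNB N bsN → blk.getD b 0 = ∑ j ∈ Finset.Ico (b*bsN) (min ((b+1)*bsN) N), g j)

theorem prefix_correct (alive blk : List Int) (bsN N : ℕ) (g : ℕ → Int)
    (hB : pvBRep alive blk bsN N g) (p : ℕ) (hp : p ≤ N) :
    pvPrefix blk alive (bsN : Int) (p : Int) = ∑ j ∈ Finset.Ico 0 p, g j := by
  obtain ⟨hbs1, hal, hbl, hga, hgb⟩ := hB
  unfold pvPrefix
  rw [PySem.Int.floordiv_natCast]
  dsimp only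
  rw [PySem.List.slice_to_natCast]
  have hqn : p / bsN < pvNB N bsN := by
    have : p / bsN ≤ N / bsN := Nat.div_le_div_right hp
    unfold pvNB; omega
  have htake := sum_drop_take blk (p / bsN) 0
  rw [List.drop_zero] at htake
  have hmin1 : min (0 + p / bsN) blk.length = p / bsN := by
    rw [hbl]; omega
  rw [hmin1] at htake
  rw [htake]
  have hblocks : ∀ q : ℕ, q * bsN ≤ N →
      ∑ b ∈ Finset.Ico 0 q, blk.getD b 0 = ∑ j ∈ Finset.Ico 0 (q * bsN), g j := by
    intro q
    induction q with
    | zero => simp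
    | succ q ih =>
      intro hq
      have hq' : q * bsN ≤ N := by nlinarith
      have hqlt : q < pvNB N bsN := by
        have h := (Nat.le_div_iff_mul_le (show 0 < bsN by omega)).mpr hq'
        unfold pvNB; omega
      rw [Finset.sum_Ico_succ_top (by omega), ih hq', hgb q hqlt]
      have hmin2 : min ((q+1)*bsN) N = (q+1)*bsN := by omega
      rw [hmin2]
      exact Finset.sum_Ico_consecutive g (by nlinarith) (by nlinarith)
  have hdivle : (p / bsN) * bsN ≤ p := Nat.div_mul_le_self p bsN
  rw [hblocks (p / bsN) (by omega)]
  rw [show ((p / bsN : ℕ) : Int) * ((bsN : ℕ) : Int) = (((p / bsN) * bsN : ℕ) : Int) by push_cast; ring,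
      PySem.List.slice_natCast, sum_drop_take]
  have hmin3 : min ((p / bsN) * bsN + (p - (p / bsN) * bsN)) alive.length = p := by
    rw [hal]; omega
  rw [hmin3]
  have hc1 : ∑ j ∈ Finset.Ico 0 ((p / bsN) * bsN), g j
      = ∑ j ∈ Finset.Ico 0 ((p / bsN) * bsN), g j := rfl
  have hc2 : ∑ j ∈ Finset.Ico ((p / bsN) * bsN) p, alive.getD j 0
      = ∑ j ∈ Finset.Ico ((p / bsN) * bsN) p, g j := by
    apply Finset.sum_congr rfl
    intro j hj
    rw [Finset.mem_Ico] at hj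
    exact hga j (by omega)
  rw [hc2]
  exact Finset.sum_Ico_consecutive g (by omega) (by omega)

theorem brep_set0 (alive blk : List Int) (bsN N : ℕ) (g : ℕ → Int)
    (hB : pvBRep alive blk bsN N g) (p : ℕ) (hp : p < N) :
    pvBRep (alive.set p 0)
      (blk.set (p / bsN)
        (∑ j ∈ Finset.Ico ((p/bsN)*bsN) (min ((p/bsN+1)*bsN) N), (fun j => if j = p then 0 else g j) j))
      bsN N (fun j => if j = p then 0 else g j) := by
  obtain ⟨hbs1, hal, hbl, hga, hgb⟩ := hB
  have hpb : p / bsN < pvNB N bsN := by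
    have : p / bsN ≤ N / bsN := Nat.div_le_div_right (by omega)
    unfold pvNB; omega
  refine ⟨hbs1, by rw [List.length_set]; exact hal, by rw [List.length_set]; exact hbl, ?_, ?_⟩
  · intro j hj
    by_cases hje : j = p
    · subst hje
      rw [getD_set_self _ _ _ (by omega)]
      simp
    · rw [getD_set_ne _ _ _ _ hje]
      show alive.getD j 0 = if j = p then 0 else g j
      rw [if_neg hje]
      exact hga j hj
  · intro b hb
    by_cases hbe : b = p / bsN
    · subst hbe
      rw [getD_set_self _ _ _ (by omega)]
    · rw [getD_set_ne _ _ _ _ hbe, hgb b hb]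
      apply Finset.sum_congr rfl
      intro j hj
      rw [Finset.mem_Ico] at hj
      have hjp : j ≠ p := by
        intro hjp
        apply hbe
        have h1 : b * bsN ≤ p := by omega
        have h2 : p < (b+1)*bsN := by omega
        have h5 : b ≤ p / bsN := (Nat.le_div_iff_mul_le (show 0 < bsN by omega)).mpr h1
        have h6 : p / bsN < b + 1 := (Nat.div_lt_iff_lt_mul (show 0 < bsN by omega)).mpr h2
        omega
      show g j = if j = p then 0 else g j
      rw [if_neg hjp]

-- position table: every entry of pos is 0 (untouched) or an index written by the enumerate loop --

theorem getD_pvSet_or (t : List Int) (i v : Int) (j : ℕ) :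
    (pvSet t i v).getD j 0 = t.getD j 0 ∨ (pvSet t i v).getD j 0 = v := by
  unfold pvSet
  rcases h : PySem.List.pyIdx? t.length i with _ | k <;>
    simp [PySem.List.pySetD, PySem.List.pySet?, h]
  rw [List.getElem?_set]
  split_ifs with h1 h2
  · right; simp
  · left
    rw [← h1, List.getElem?_eq_none (by omega)]
  · left; rfl

theorem mkpos_bound (arr : List Int) :
    ∀ (s : Int) (init : List Int) (v : ℕ),
      (((PySem.List.enumerate arr s).foldl (fun p iv => pvSet p iv.2 iv.1) init).getD v 0
          = init.getD v 0)
      ∨ (s ≤ ((PySem.List.enumerate arr s).foldl (fun p iv => pvSet p iv.2 iv.1) init).getD v 0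
          ∧ ((PySem.List.enumerate arr s).foldl (fun p iv => pvSet p iv.2 iv.1) init).getD v 0
            < s + arr.length) := by
  induction arr using List.reverseRecOn with
  | nil => exact fun s init v => Or.inl rfl
  | append_singleton xs a ih =>
    intro s init v
    rw [PySem.List.enumerate_append, List.foldl_append]
    have hsing : PySem.List.enumerate [a] (s + (xs.length:Int)) = [((s + (xs.length:Int)), a)] := by
      rw [PySem.List.enumerate_cons, PySem.List.enumerate_nil]
    rw [hsing]
    simp only [List.foldl_cons, List.foldl_nil]
    rcases getD_pvSet_or ((PySem.List.enumerate xs s).foldl (fun p iv => pvSet p iv.2 iv.1) init)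
        a (s + (xs.length:Int)) v with h | h
    · rw [h]
      rcases ih s init v with h2 | h2
      · exact Or.inl h2
      · right
        rw [List.length_append, List.length_singleton]
        push_cast
        omega
    · right
      rw [h, List.length_append, List.length_singleton]
      push_cast
      omega

-- the evolving low/high counters after i rounds
def pvLow (i : ℕ) : ℕ := 1 + (i+1)/2
def pvHigh (N i : ℕ) : ℕ := N - i/2

-- the loop bodies of the two ports (definitionally equal to the lambdas in the ports)
def pvStepA (n : Int) (pos : List Int) (st : List Int × Int × Int × List String) (i : Int) :
    List Int × Int × Int × List String :=
  let tree := st.1; let low := st.2.1; let high := st.2.2.1; let output := st.2.2.2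
  if PySem.Int.mod i 2 = 0 then
    let x := low
    let swaps := query tree n 0 (pvGet pos x)
    (update tree n (pvGet pos x) 0, low + 1, high, output ++ [PySem.Int.toStr swaps])
  else
    let x := high
    let swaps := query tree n (pvGet pos x + 1) n
    (update tree n (pvGet pos x) 0, low, high - 1, output ++ [PySem.Int.toStr swaps])

def pvStepB (n : Int) (pos : List Int) (bs : Int)
    (st : List Int × List Int × Int × Int × List String) (r : Int) :
    List Int × List Int × Int × Int × List String :=
  let alive := st.1; let blk := st.2.1; let low := st.2.2.1
  let high := st.2.2.2.1; let out := st.2.2.2.2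
  let xswaps :=
    if PySem.Int.mod r 2 = 0 then
      (low, pvPrefix blk alive bs (pvGet pos low), low + 1, high)
    else
      (high, pvPrefix blk alive bs n - pvPrefix blk alive bs (pvGet pos high + 1), low, high - 1)
  let x := xswaps.1; let swaps := xswaps.2.1
  let p := pvGet pos x
  let alive2 := pvSet alive p 0
  let q := PySem.Int.floordiv p bs
  (alive2,
   pvSet blk q (PySem.List.slice alive2 (some (q * bs)) (some (q * bs + bs))).sum,
   xswaps.2.2.1, xswaps.2.2.2, out ++ [PySem.Int.toStr swaps])

theorem loop_eq (N : ℕ) (pos : List Int) (bsN : ℕ)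
    (hposB : ∀ v : ℕ, 0 ≤ pos.getD v 0 ∧ (1 ≤ N → pos.getD v 0 < (N:Int)))
    (hbs : 1 ≤ bsN) :
    ∀ (cnt i : ℕ), i + cnt ≤ N →
    ∀ (g : ℕ → Int) (tree alive blk : List Int) (outA outB : List String), outA = outB →
    pvRep tree N g →
    pvBRep alive blk bsN N g →
    ((((List.range' i cnt).map (fun k : ℕ => (k:Int))).foldl (pvStepA (N:Int) pos)
        (tree, ((pvLow i : ℕ) : Int), ((pvHigh N i : ℕ) : Int), outA)).2.2.2
      = (((List.range' i cnt).map (fun k : ℕ => (k:Int))).foldl (pvStepB (N:Int) pos (bsN:Int))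
        (alive, blk, ((pvLow i : ℕ) : Int), ((pvHigh N i : ℕ) : Int), outB)).2.2.2.2) := by
  intro cnt
  induction cnt with
  | zero =>
    intro i hi g tree alive blk outA outB houts _ _
    simpa using houts
  | succ cnt ih =>
    intro i hi g tree alive blk outA outB houts hRep hBrep
    rw [List.range'_succ, List.map_cons, List.foldl_cons, List.foldl_cons]
    have hiN : i < N := by omega
    have hN1 : 1 ≤ N := by omega
    have halen : alive.length = N := hBrep.2.1
    by_cases hpar : i % 2 = 0
    · -- even round: x = pvLow i
      have hpb := hposB (pvLow i)
      set p := (pos.getD (pvLow i) 0).toNat with hpdef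
      have hpN : p < N := by
        have := hpb.2 hN1
        omega
      have hposx : pvGet pos ((pvLow i : ℕ) : Int) = ((p:ℕ) : Int) := by
        rw [pvGet_natCast]
        omega
      have hmodI : PySem.Int.mod ((i:ℕ):Int) 2 = 0 := by
        rw [PySem.Int.mod_eq_emod_of_pos (by norm_num)]; omega
      have hswapA : query tree (N:Int) 0 ((p:Int)) = ∑ j ∈ Finset.Ico 0 p, g j := by
        have := query_correct tree N _ hRep 0 p (by omega) (by omega) hN1
        simpa using this
      have hswapB : pvPrefix blk alive (bsN:Int) ((p:Int)) = ∑ j ∈ Finset.Ico 0 p, g j :=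
        prefix_correct alive blk bsN N _ hBrep p (by omega)
      have hvslice : (PySem.List.slice (alive.set p 0) (some (((p / bsN : ℕ):Int) * (bsN:Int)))
            (some (((p / bsN : ℕ):Int) * (bsN:Int) + (bsN:Int)))).sum
          = ∑ j ∈ Finset.Ico ((p/bsN)*bsN) (min ((p/bsN+1)*bsN) N),
              (fun j => if j = p then (0:Int) else g j) j := by
        rw [show (((p / bsN : ℕ):Int) * (bsN:Int)) = ((p/bsN*bsN : ℕ):Int) by push_cast; ring,
            show ((((p/bsN*bsN) : ℕ):Int) + (bsN:Int)) = ((p/bsN*bsN + bsN : ℕ):Int) by push_cast; ring,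
            PySem.List.slice_natCast, show p/bsN*bsN + bsN - p/bsN*bsN = bsN by omega,
            sum_drop_take, List.length_set, halen,
            show p/bsN*bsN + bsN = (p/bsN+1)*bsN by ring]
        apply Finset.sum_congr rfl
        intro j hj
        rw [Finset.mem_Ico] at hj
        by_cases hje : j = p
        · subst hje
          rw [getD_set_self _ _ _ (by omega)]
          simp
        · rw [getD_set_ne _ _ _ _ hje]
          show alive.getD j 0 = if j = p then 0 else g j
          rw [if_neg hje]
          exact hBrep.2.2.2.1 j (by omega)
      have hstepA : pvStepA (N:Int) pos (tree, ((pvLow i : ℕ) : Int), ((pvHigh N i : ℕ) : Int), outA) ((i:ℕ):Int)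
          = (update tree (N:Int) ((p:ℕ):Int) 0, ((pvLow i : ℕ) : Int) + 1, ((pvHigh N i : ℕ) : Int),
             outA ++ [PySem.Int.toStr (∑ j ∈ Finset.Ico 0 p, g j)]) := by
        unfold pvStepA
        dsimp only
        rw [if_pos hmodI]
        rw [hposx, hswapA]
      have hstepB : pvStepB (N:Int) pos (bsN:Int)
            (alive, blk, ((pvLow i : ℕ) : Int), ((pvHigh N i : ℕ) : Int), outB) ((i:ℕ):Int)
          = (alive.set p 0,
             blk.set (p / bsN)
               (∑ j ∈ Finset.Ico ((p/bsN)*bsN) (min ((p/bsN+1)*bsN) N),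
                 (fun j => if j = p then (0:Int) else g j) j),
             ((pvLow i : ℕ) : Int) + 1, ((pvHigh N i : ℕ) : Int),
             outB ++ [PySem.Int.toStr (∑ j ∈ Finset.Ico 0 p, g j)]) := by
        unfold pvStepB
        dsimp only
        rw [if_pos hmodI]
        dsimp only
        rw [hposx, hswapB, PySem.Int.floordiv_natCast, pvSet_natCast, hvslice, pvSet_natCast]
      rw [hstepA, hstepB]
      have hcastlow : ((pvLow i : ℕ) : Int) + 1 = ((pvLow (i+1) : ℕ) : Int) := by
        unfold pvLow; push_cast; omega
      have hcasthigh : ((pvHigh N i : ℕ) : Int) = ((pvHigh N (i+1) : ℕ) : Int) := by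
        unfold pvHigh; push_cast; omega
      have hRep' : pvRep (update tree (N:Int) ((p:ℕ):Int) 0) N (fun j => if j = p then 0 else g j) :=
        update_correct tree N _ hRep p hpN 0
      have hBrep' := brep_set0 alive blk bsN N g hBrep p hpN
      rw [hcastlow, hcasthigh]
      exact ih (i+1) (by omega) _ _ _ _ _ _ (by rw [houts]) hRep' hBrep'
    · -- odd round: x = pvHigh N i
      have hpb := hposB (pvHigh N i)
      set p := (pos.getD (pvHigh N i) 0).toNat with hpdef
      have hpN : p < N := by
        have := hpb.2 hN1
        omega
      have hposx : pvGet pos ((pvHigh N i : ℕ) : Int) = ((p:ℕ) : Int) := by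
        rw [pvGet_natCast]
        omega
      have hmodI : ¬ PySem.Int.mod ((i:ℕ):Int) 2 = 0 := by
        rw [PySem.Int.mod_eq_emod_of_pos (by norm_num)]; omega
      have hswapA : query tree (N:Int) ((p:Int) + 1) ((N:ℕ):Int)
          = ∑ j ∈ Finset.Ico (p+1) N, g j := by
        have := query_correct tree N _ hRep (p+1) N (by omega) (by omega) hN1
        rw [show ((p:Int) + 1) = (((p+1 : ℕ)):Int) by push_cast; ring]
        exact this
      have hswapB : pvPrefix blk alive (bsN:Int) ((N:ℕ):Int)
            - pvPrefix blk alive (bsN:Int) ((p:Int) + 1)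
          = ∑ j ∈ Finset.Ico (p+1) N, g j := by
        rw [show ((p:Int) + 1) = (((p+1 : ℕ)):Int) by push_cast; ring,
            prefix_correct alive blk bsN N _ hBrep N (le_refl N),
            prefix_correct alive blk bsN N _ hBrep (p+1) (by omega)]
        have := Finset.sum_Ico_consecutive g (show 0 ≤ p+1 by omega) (show p+1 ≤ N by omega)
        omega
      have hvslice : (PySem.List.slice (alive.set p 0) (some (((p / bsN : ℕ):Int) * (bsN:Int)))
            (some (((p / bsN : ℕ):Int) * (bsN:Int) + (bsN:Int)))).sum
          = ∑ j ∈ Finset.Ico ((p/bsN)*bsN) (min ((p/bsN+1)*bsN) N),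
              (fun j => if j = p then (0:Int) else g j) j := by
        rw [show (((p / bsN : ℕ):Int) * (bsN:Int)) = ((p/bsN*bsN : ℕ):Int) by push_cast; ring,
            show ((((p/bsN*bsN) : ℕ):Int) + (bsN:Int)) = ((p/bsN*bsN + bsN : ℕ):Int) by push_cast; ring,
            PySem.List.slice_natCast, show p/bsN*bsN + bsN - p/bsN*bsN = bsN by omega,
            sum_drop_take, List.length_set, halen,
            show p/bsN*bsN + bsN = (p/bsN+1)*bsN by ring]
        apply Finset.sum_congr rfl
        intro j hj
        rw [Finset.mem_Ico] at hj
        by_cases hje : j = p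
        · subst hje
          rw [getD_set_self _ _ _ (by omega)]
          simp
        · rw [getD_set_ne _ _ _ _ hje]
          show alive.getD j 0 = if j = p then 0 else g j
          rw [if_neg hje]
          exact hBrep.2.2.2.1 j (by omega)
      have hstepA : pvStepA (N:Int) pos (tree, ((pvLow i : ℕ) : Int), ((pvHigh N i : ℕ) : Int), outA) ((i:ℕ):Int)
          = (update tree (N:Int) ((p:ℕ):Int) 0, ((pvLow i : ℕ) : Int), ((pvHigh N i : ℕ) : Int) - 1,
             outA ++ [PySem.Int.toStr (∑ j ∈ Finset.Ico (p+1) N, g j)]) := by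
        unfold pvStepA
        dsimp only
        rw [if_neg hmodI]
        rw [hposx, hswapA]
      have hstepB : pvStepB (N:Int) pos (bsN:Int)
            (alive, blk, ((pvLow i : ℕ) : Int), ((pvHigh N i : ℕ) : Int), outB) ((i:ℕ):Int)
          = (alive.set p 0,
             blk.set (p / bsN)
               (∑ j ∈ Finset.Ico ((p/bsN)*bsN) (min ((p/bsN+1)*bsN) N),
                 (fun j => if j = p then (0:Int) else g j) j),
             ((pvLow i : ℕ) : Int), ((pvHigh N i : ℕ) : Int) - 1,
             outB ++ [PySem.Int.toStr (∑ j ∈ Finset.Ico (p+1) N, g j)]) := by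
        unfold pvStepB
        dsimp only
        rw [if_neg hmodI]
        dsimp only
        rw [hposx, hswapB, PySem.Int.floordiv_natCast, pvSet_natCast, hvslice, pvSet_natCast]
      rw [hstepA, hstepB]
      have hcastlow : ((pvLow i : ℕ) : Int) = ((pvLow (i+1) : ℕ) : Int) := by
        unfold pvLow; push_cast; omega
      have hcasthigh : ((pvHigh N i : ℕ) : Int) - 1 = ((pvHigh N (i+1) : ℕ) : Int) := by
        unfold pvHigh; push_cast; omega
      have hRep' : pvRep (update tree (N:Int) ((p:ℕ):Int) 0) N (fun j => if j = p then 0 else g j) :=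
        update_correct tree N _ hRep p hpN 0
      have hBrep' := brep_set0 alive blk bsN N g hBrep p hpN
      rw [hcastlow, hcasthigh]
      exact ih (i+1) (by omega) _ _ _ _ _ _ (by rw [houts]) hRep' hBrep'

-- ===== VERDICT (by name: the statement is the Claim_ definition above) =====
theorem solve_turbo_sort_spec : Claim_equal_solve_turbo_sort := by
  intro n arr _hdom hpre
  unfold Spec_solve_turbo_sort
  rcases hpre with ⟨hn0, hlenle, _hvals⟩ | ⟨hneg, harrnil⟩
  · -- 0 ≤ n, len(arr) ≤ n: the real domain
    obtain ⟨N, rfl⟩ : ∃ N : ℕ, n = (N:Int) := ⟨n.toNat, by omega⟩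
    have hlen : arr.length ≤ N := by exact_mod_cast hlenle
    -- the position table: entries are 0 or indices < len(arr)
    set pos := (PySem.List.enumerate arr).foldl (fun p iv => pvSet p iv.2 iv.1)
        (List.replicate ((N:Int) + 1).toNat 0) with hposdef
    have hposB : ∀ v : ℕ, 0 ≤ pos.getD v 0 ∧ (1 ≤ N → pos.getD v 0 < (N:Int)) := by
      intro v
      have hmb := mkpos_bound arr 0 (List.replicate ((N:Int) + 1).toNat 0) v
      rw [← hposdef] at hmb
      have hinit : (List.replicate ((N:Int)+1).toNat (0:Int)).getD v 0 = 0 := by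
        rw [getD_replicate]
        split_ifs <;> rfl
      rw [hinit] at hmb
      rcases hmb with h | h
      · rw [h]
        constructor
        · exact le_refl 0
        · intro h1; exact_mod_cast h1
      · constructor
        · omega
        · intro _
          have : ((arr.length : ℕ) : Int) ≤ ((N:ℕ):Int) := by exact_mod_cast hlen
          omega
    -- the block size of B
    have hbs1 : (1:Int) ≤ bsLoop (N:Int) 1 := bsLoop_ge (N:Int) 1
    set bsN := (bsLoop (N:Int) 1).toNat with hbsNdef
    have hbscast : bsLoop ((N:ℕ):Int) 1 = (bsN : Int) := by omega
    have hbsN1 : 1 ≤ bsN := by omega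
    -- the initial states represent the all-ones membership function
    have hRep0 : pvRep (build_segment_tree (N:Int)) N (fun _ => 1) := build_correct N
    set alive0 : List Int := List.replicate ((N:Int)).toNat 1 with halive0def
    have halive0' : alive0 = List.replicate N (1:Int) := by
      rw [halive0def, Int.toNat_natCast]
    have hFblk : ∀ b : ℕ, b < pvNB N bsN →
        (PySem.List.slice alive0 (some ((b:Int) * (bsN:Int))) (some ((b:Int) * (bsN:Int) + (bsN:Int)))).sum
          = ∑ j ∈ Finset.Ico (b*bsN) (min ((b+1)*bsN) N), (fun _ => (1:Int)) j := by
      intro b _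
      rw [show ((b:Int) * (bsN:Int)) = ((b*bsN : ℕ):Int) by push_cast; ring,
          show (((b*bsN : ℕ):Int) + (bsN:Int)) = ((b*bsN + bsN : ℕ):Int) by push_cast; ring,
          PySem.List.slice_natCast, show b*bsN + bsN - b*bsN = bsN by omega,
          sum_drop_take, halive0', List.length_replicate,
          show b*bsN + bsN = (b+1)*bsN by ring]
      apply Finset.sum_congr rfl
      intro j hj
      rw [Finset.mem_Ico] at hj
      rw [getD_replicate, if_pos (by omega)]
    set nbI := PySem.Int.floordiv ((N:ℕ):Int) (bsLoop ((N:ℕ):Int) 1) + 1 with hnbIdef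
    have hnbI : nbI = ((pvNB N bsN : ℕ):Int) := by
      rw [hnbIdef, hbscast, show ((N:ℕ):Int) = (((N:ℕ):ℕ):Int) by norm_num,
          PySem.Int.floordiv_natCast]
      unfold pvNB
      push_cast
      ring
    have hblkfold :
        ((PySem.List.pyRange 0 nbI 1).foldl
          (fun bl b => pvSet bl b (PySem.List.slice alive0 (some (b * bsLoop ((N:ℕ):Int) 1))
              (some (b * bsLoop ((N:ℕ):Int) 1 + bsLoop ((N:ℕ):Int) 1))).sum)
          (List.replicate nbI.toNat 0)).length = pvNB N bsN ∧
        ∀ b, b < pvNB N bsN →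
        ((PySem.List.pyRange 0 nbI 1).foldl
          (fun bl b => pvSet bl b (PySem.List.slice alive0 (some (b * bsLoop ((N:ℕ):Int) 1))
              (some (b * bsLoop ((N:ℕ):Int) 1 + bsLoop ((N:ℕ):Int) 1))).sum)
          (List.replicate nbI.toNat 0)).getD b 0
          = ∑ j ∈ Finset.Ico (b*bsN) (min ((b+1)*bsN) N), (fun _ => (1:Int)) j := by
      rw [hnbI, Int.toNat_natCast, PySem.List.pyRange_zero_nat, List.foldl_map, hbscast]
      have hf : (fun (bl : List Int) (b : ℕ) =>
            pvSet bl ((b:ℕ):Int) (PySem.List.slice alive0 (some ((b:Int) * (bsN:Int)))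
              (some ((b:Int) * (bsN:Int) + (bsN:Int)))).sum)
          = fun (bl : List Int) (b : ℕ) => bl.set (0 + b)
              ((fun b => (PySem.List.slice alive0 (some ((b:Int) * (bsN:Int)))
                (some ((b:Int) * (bsN:Int) + (bsN:Int)))).sum) b) := by
        funext bl b
        rw [pvSet_natCast, Nat.zero_add]
      rw [hf]
      have hfsr := foldl_set_range
        (fun b => (PySem.List.slice alive0 (some ((b:Int) * (bsN:Int)))
          (some ((b:Int) * (bsN:Int) + (bsN:Int)))).sum) 0 (pvNB N bsN)
        (List.replicate (pvNB N bsN) 0) (by rw [List.length_replicate]; omega)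
      constructor
      · rw [hfsr.1, List.length_replicate]
      · intro b hb
        rw [hfsr.2 b, if_pos ⟨by omega, by omega⟩]
        exact hFblk b hb
    have hBrep0 : pvBRep alive0
        ((PySem.List.pyRange 0 nbI 1).foldl
          (fun bl b => pvSet bl b (PySem.List.slice alive0 (some (b * bsLoop ((N:ℕ):Int) 1))
              (some (b * bsLoop ((N:ℕ):Int) 1 + bsLoop ((N:ℕ):Int) 1))).sum)
          (List.replicate nbI.toNat 0)) bsN N (fun _ => 1) := by
      refine ⟨hbsN1, by rw [halive0', List.length_replicate], hblkfold.1, ?_, hblkfold.2⟩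
      intro j hj
      rw [halive0', getD_replicate, if_pos hj]
    -- both ports are folds of their step functions
    have hA : solve_turbo_sort ((N:ℕ):Int) arr
        = ((PySem.List.pyRange 0 ((N:ℕ):Int) 1).foldl (pvStepA ((N:ℕ):Int) pos)
            (build_segment_tree ((N:ℕ):Int), 1, ((N:ℕ):Int), ([]:List String))).2.2.2 := rfl
    have hB : solve_turbo_sort_alt ((N:ℕ):Int) arr
        = ((PySem.List.pyRange 0 ((N:ℕ):Int) 1).foldl
              (pvStepB ((N:ℕ):Int) pos (bsLoop ((N:ℕ):Int) 1))
            (alive0,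
             (PySem.List.pyRange 0 nbI 1).foldl
               (fun bl b => pvSet bl b (PySem.List.slice alive0 (some (b * bsLoop ((N:ℕ):Int) 1))
                   (some (b * bsLoop ((N:ℕ):Int) 1 + bsLoop ((N:ℕ):Int) 1))).sum)
               (List.replicate nbI.toNat 0),
             1, ((N:ℕ):Int), ([]:List String))).2.2.2.2 := rfl
    rw [hA, hB, hbscast, PySem.List.pyRange_zero_nat, List.range_eq_range']
    have LE := loop_eq N pos bsN hposB hbsN1 N 0 (by omega) (fun _ => 1)
      (build_segment_tree ((N:ℕ):Int)) alive0
      ((PySem.List.pyRange 0 nbI 1).foldl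
        (fun bl b => pvSet bl b (PySem.List.slice alive0 (some (b * bsLoop ((N:ℕ):Int) 1))
            (some (b * bsLoop ((N:ℕ):Int) 1 + bsLoop ((N:ℕ):Int) 1))).sum)
        (List.replicate nbI.toNat 0))
      [] [] rfl hRep0 hBrep0
    have hl0 : ((pvLow 0 : ℕ):Int) = 1 := by unfold pvLow; norm_num
    have hh0 : ((pvHigh N 0 : ℕ):Int) = ((N:ℕ):Int) := by unfold pvHigh; norm_num
    rw [hl0, hh0, hbscast] at LE
    exact LE
  · -- n < 0: both loops run over range(n) = [] and return []
    subst harrnil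
    have h1 : PySem.List.pyRange 0 n 1 = [] := PySem.List.pyRange_one_eq_nil (by omega)
    simp [solve_turbo_sort, solve_turbo_sort_alt, h1]
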